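-- pv_equiv track=rewrite | github.com/kaiqiboy/dsso | dsso-deploy/preprocessor.py | split_plan
-- ===== SOURCE A (Python) =====
-- def split_plan(operations): # operations: list of string
--     # split skeleton and details
--     skeleton = []
--     detail = []
--     flag = False
--     for o in operations:
--         if(len(o) > 0):
--             if(o[0] == "("):
--                 flag = True
--             if(flag == False):
--                 skeleton.append(o)
--             else:
--                 detail.append(o)
--     skeleton = skeleton[1:]
--
--     return skeleton, detail
-- ===== SOURCE B (Python) =====
-- def split_plan(operations):
--     nonempty = [o for o in operations if o]
--     idx = next((i for i, o in enumerate(nonempty) if o[0] == "("), len(nonempty))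
--     return nonempty[1:idx], nonempty[idx:]
-- ===== Notes on version B (the rewrite author's own statement) =====
-- stated objective: simpler
-- what changed: Replaces the two-accumulator loop with a flip-once flag by filtering empties once, computing the index of the first '('-token, and returning two slices of that filtered list.
import Mathlib
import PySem

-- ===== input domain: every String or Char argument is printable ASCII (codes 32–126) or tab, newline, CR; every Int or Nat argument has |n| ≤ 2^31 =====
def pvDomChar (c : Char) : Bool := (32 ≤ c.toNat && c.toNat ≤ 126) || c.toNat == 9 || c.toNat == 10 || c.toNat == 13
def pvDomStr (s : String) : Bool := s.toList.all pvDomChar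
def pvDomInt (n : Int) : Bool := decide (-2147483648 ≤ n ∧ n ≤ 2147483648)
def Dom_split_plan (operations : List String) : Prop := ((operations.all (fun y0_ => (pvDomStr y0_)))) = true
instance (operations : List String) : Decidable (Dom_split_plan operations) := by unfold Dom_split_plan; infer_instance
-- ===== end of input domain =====

-- B replaces A's flip-once flag loop with: filter empties once, find the first '('-token index, slice (objective: simpler).


-- ===== PORT A =====
-- one iteration of A's loop over state (skeleton, detail, flag)
def splitStep (s : List String × List String × Bool) (o : String) : List String × List String × Bool :=
  if 0 < o.toList.length then        -- len(o) > 0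
    -- o[0] == "(" : o is nonempty here, so o[0] is the head of its character list
    let flag := if o.toList.head? = some '(' then true else s.2.2
    if flag = false then (s.1 ++ [o], s.2.1, flag)
    else (s.1, s.2.1 ++ [o], flag)
  else s

def split_plan (operations : List String) : List String × List String :=
  let st := operations.foldl splitStep ([], [], false)
  (st.1.drop 1, st.2.1)              -- skeleton[1:] on a list = drop 1

-- ===== PORT B =====
def split_plan_alt (operations : List String) : List String × List String :=
  let nonempty := operations.filter (fun o => o.toList ≠ [])   -- [o for o in operations if o]
  let idx := nonempty.findIdx (fun o => o.toList.head? = some '(')  -- next(..., len(nonempty))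
  ((nonempty.take idx).drop 1, nonempty.drop idx)              -- nonempty[1:idx], nonempty[idx:]

-- ===== PRECONDITION & SPEC =====
def Spec_split_plan (operations : List String) (out : List String × List String) : Prop := out = split_plan_alt operations
instance (operations : List String) (out : List String × List String) : Decidable (Spec_split_plan operations out) := by unfold Spec_split_plan; infer_instance

-- ===== CLAIM (what is proved, stated in full; the proofs are below) =====
def Claim_equal_split_plan : Prop := ∀ (operations : List String), Dom_split_plan operations → Spec_split_plan operations (split_plan operations)

-- ===== LEMMAS AND PROOFS =====

-- once the flag is true, everything nonempty goes to detail
theorem splitLoop_true (l : List String) (sk dt : List String) :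
    l.foldl splitStep (sk, dt, true) = (sk, dt ++ l.filter (fun o => o ≠ ""), true) := by
  induction l generalizing dt with
  | nil => simp
  | cons o l ih =>
      by_cases h : 0 < o.toList.length
      · have h2 : 0 < o.length := by simpa using h
        have hne : o ≠ "" := by
          intro he; rw [he] at h; simp at h
        simp [List.foldl_cons, splitStep, h2, hne, ih]
      · have heq : o = "" := by
          apply String.toList_eq_nil_iff.mp
          cases he : o.toList with
          | nil => rfl
          | cons c cs => exact absurd (by simp [he]) h
        have h2 : ¬ 0 < o.length := by simpa using h
        simp [List.foldl_cons, splitStep, heq, ih]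

-- the flag-false loop splits the nonempty tokens at the first '('-token
theorem splitLoop_false (l : List String) (sk dt : List String) :
    l.foldl splitStep (sk, dt, false) =
      (sk ++ (l.filter (fun o => o ≠ "")).take
              ((l.filter (fun o => o ≠ "")).findIdx (fun o => o.toList.head? = some '(')),
       dt ++ (l.filter (fun o => o ≠ "")).drop
              ((l.filter (fun o => o ≠ "")).findIdx (fun o => o.toList.head? = some '(')),
       (l.filter (fun o => o ≠ "")).any (fun o => o.toList.head? = some '(')) := by
  induction l generalizing sk dt with
  | nil => simp
  | cons o l ih =>
      by_cases h : 0 < o.toList.length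
      · have h2 : 0 < o.length := by simpa using h
        have hne : o ≠ "" := by
          intro he; rw [he] at h; simp at h
        by_cases hp : o.toList.head? = some '('
        · simp [List.foldl_cons, splitStep, h2, hp, hne, splitLoop_true, List.findIdx_cons]
        · simp [List.foldl_cons, splitStep, h2, hp, hne, ih, List.findIdx_cons]
      · have heq : o = "" := by
          apply String.toList_eq_nil_iff.mp
          cases he : o.toList with
          | nil => rfl
          | cons c cs => exact absurd (by simp [he]) h
        have h2 : ¬ 0 < o.length := by simpa using h
        simp [List.foldl_cons, splitStep, heq, ih]

-- ===== VERDICT (by name: the statement is the Claim_ definition above) =====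
theorem split_plan_spec : Claim_equal_split_plan := by
  intro operations _
  unfold Spec_split_plan split_plan split_plan_alt
  simp [splitLoop_false]
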